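-- pv_equiv track=rewrite | github.com/Abhi001vj/coding-interview-preparation | leetcode_discussion_google/Party Invitation Problem (Maximum Independent Set).py | maxGuestsColoring
-- ===== SOURCE A (Python) =====
-- from collections import defaultdict
-- from typing import List, Set, Dict, Tuple
--
-- def maxGuestsColoring(dislikes: List[Tuple[int, int]]) -> int:
--     """
--     Alternative approach using graph coloring
--     Time: O(V+E) where V is vertices and E is edges
--     Space: O(V) for colors and graph
--
--     Visual:
--     1(R) -- 2(B) -- 3(R) -- 4(B)
--     Take max(count of Red, count of Blue)
--     """
--     graph = defaultdict(set)
--     for a, b in dislikes: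
--         graph[a].add(b)
--         graph[b].add(a)
--
--     colors = {}  # 1: Red, -1: Blue
--
--     def can_color(person: int, color: int) -> bool:
--         """Check if we can assign color to person"""
--         return all(colors.get(enemy, color) != color
--                   for enemy in graph[person])
--
--     def color_graph(person: int, color: int) -> bool:
--         """
--         Color graph using two colors
--         Returns if valid coloring is possible
--         """
--         colors[person] = color
--         # Color all neighbors with opposite color
--         for enemy in graph[person]:
--             if enemy not in colors:
--                 if not color_graph(enemy, -color):
--                     return False
--             elif colors[enemy] == color:
--                 return False
--         return True
--
--     # Try coloring from each uncolored vertex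
--     for person in graph:
--         if person not in colors:
--             if not color_graph(person, 1):
--                 return 0  # Not possible to color
--
--     # Count colors
--     red = sum(1 for c in colors.values() if c == 1)
--     blue = sum(1 for c in colors.values() if c == -1)
--     return max(red, blue)
-- ===== SOURCE B (Python) =====
-- from collections import defaultdict, deque
-- from typing import List, Tuple
--
--
-- def maxGuestsColoring(dislikes: List[Tuple[int, int]]) -> int:
--     graph = defaultdict(set)
--     for a, b in dislikes:
--         graph[a].add(b)
--         graph[b].add(a)
--
--     color = {}
--     for start in graph:
--         if start in color:
--             continue
--         color[start] = 1
--         queue = deque([start])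
--         while queue:
--             v = queue.popleft()
--             for u in graph[v]:
--                 if u not in color:
--                     color[u] = -color[v]
--                     queue.append(u)
--                 elif color[u] == color[v]:
--                     return 0
--
--     red = sum(1 for c in color.values() if c == 1)
--     return max(red, len(color) - red)
-- ===== Notes on version B (the rewrite author's own statement) =====
-- stated objective: alternative
-- what changed: Replaces the recursive DFS two-coloring (helper color_graph plus the unused can_color) with an iterative BFS over a collections.deque, and counts the smaller class as len(color)-red instead of a second scan; the return value is identical because a component's 2-coloring is forced by its start vertex regardless of traversal order.
import Mathlib
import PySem

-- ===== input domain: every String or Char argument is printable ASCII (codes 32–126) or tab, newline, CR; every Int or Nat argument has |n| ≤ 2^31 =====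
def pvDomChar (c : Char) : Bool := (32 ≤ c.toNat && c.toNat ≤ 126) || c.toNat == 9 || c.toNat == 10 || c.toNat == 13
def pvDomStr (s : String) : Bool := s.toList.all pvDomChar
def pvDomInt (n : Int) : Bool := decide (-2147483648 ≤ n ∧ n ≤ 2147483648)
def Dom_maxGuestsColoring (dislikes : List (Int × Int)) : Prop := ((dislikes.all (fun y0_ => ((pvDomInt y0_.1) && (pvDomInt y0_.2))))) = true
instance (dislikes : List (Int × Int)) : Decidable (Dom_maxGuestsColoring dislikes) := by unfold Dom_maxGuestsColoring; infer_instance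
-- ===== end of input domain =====

-- B replaces A's recursive DFS 2-coloring with an iterative BFS (deque) and derives the
-- second class size as len(color)-red; same return value on every input (objective: alternative).

-- ===== PORT A =====

-- graph = defaultdict(set); for a, b in dislikes: graph[a].add(b); graph[b].add(a)
def pvBuildGraphA (dislikes : List (Int × Int)) : PySem.Dict Int (PySem.Set Int) :=
  dislikes.foldl (fun g p =>
    (g.modify p.1 PySem.Set.empty (fun s => PySem.Set.add s p.2)).modify p.2
      PySem.Set.empty (fun s => PySem.Set.add s p.1)) PySem.Dict.empty

-- color_graph, on fuel (Python recursion; fuel is proved sufficient below): returns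
-- none on fuel exhaustion (never reached from maxGuestsColoring).
mutual
def pvDfsA (g : PySem.Dict Int (PySem.Set Int)) (fuel : Nat)
    (colors : PySem.Dict Int Int) (person color : Int) :
    Option (Bool × PySem.Dict Int Int) :=
  match fuel with
  | 0 => none
  | fuel + 1 =>
    pvDfsLoopA g fuel (g.getD person PySem.Set.empty) (colors.insert person color) color
termination_by (fuel, 0)
decreasing_by all_goals (simp_wf; omega)

-- the 'for enemy in graph[person]' loop of color_graph
def pvDfsLoopA (g : PySem.Dict Int (PySem.Set Int)) (fuel : Nat)
    (enemies : List Int) (colors : PySem.Dict Int Int) (color : Int) :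
    Option (Bool × PySem.Dict Int Int) :=
  match enemies with
  | [] => some (true, colors)
  | e :: rest =>
    if colors.contains e then
      if colors.getD e 0 == color then some (false, colors)
      else pvDfsLoopA g fuel rest colors color
    else
      match pvDfsA g fuel colors e (-color) with
      | none => none
      | some (false, cs) => some (false, cs)
      | some (true, cs) => pvDfsLoopA g fuel rest cs color
termination_by (fuel, enemies.length + 1)
decreasing_by all_goals (simp_wf; omega)
end

-- 'for person in graph: if person not in colors: if not color_graph(person, 1): return 0'
def pvOuterA (g : PySem.Dict Int (PySem.Set Int)) (fuel : Nat) :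
    List Int → PySem.Dict Int Int → Option (Bool × PySem.Dict Int Int)
  | [], colors => some (true, colors)
  | p :: rest, colors =>
    if colors.contains p then pvOuterA g fuel rest colors
    else
      match pvDfsA g fuel colors p 1 with
      | none => none
      | some (false, cs) => some (false, cs)
      | some (true, cs) => pvOuterA g fuel rest cs

def maxGuestsColoring (dislikes : List (Int × Int)) : Int :=
  let g := pvBuildGraphA dislikes
  match pvOuterA g (g.size + 2) g.keys PySem.Dict.empty with
  | none => 0      -- fuel exhaustion: proved unreachable
  | some (false, _) => 0
  | some (true, colors) =>
    let red := (colors.values.filter (fun c => c == 1)).length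
    let blue := (colors.values.filter (fun c => c == -1)).length
    ((max red blue : Nat) : Int)

-- ===== PORT B =====

-- 'for u in graph[v]': color fresh neighbours, append them to the queue; none = conflict
def pvBfsScanB (v : Int) : List Int → PySem.Dict Int Int → List Int →
    Option (PySem.Dict Int Int × List Int)
  | [], colors, q => some (colors, q)
  | u :: rest, colors, q =>
    if colors.contains u then
      if colors.getD u 0 == colors.getD v 0 then none
      else pvBfsScanB v rest colors q
    else pvBfsScanB v rest (colors.insert u (-(colors.getD v 0))) (q ++ [u])

-- 'while queue:' on fuel (proved sufficient below)
def pvBfsB (g : PySem.Dict Int (PySem.Set Int)) : Nat → PySem.Dict Int Int → List Int →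
    Option (Bool × PySem.Dict Int Int)
  | 0, _, _ => none
  | _ + 1, colors, [] => some (true, colors)
  | fuel + 1, colors, v :: qs =>
    match pvBfsScanB v (g.getD v PySem.Set.empty) colors qs with
    | none => some (false, colors)
    | some (colors', q') => pvBfsB g fuel colors' q'

def pvOuterB (g : PySem.Dict Int (PySem.Set Int)) (fuel : Nat) :
    List Int → PySem.Dict Int Int → Option (Bool × PySem.Dict Int Int)
  | [], colors => some (true, colors)
  | p :: rest, colors =>
    if colors.contains p then pvOuterB g fuel rest colors
    else
      match pvBfsB g fuel (colors.insert p 1) [p] with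
      | none => none
      | some (false, cs) => some (false, cs)
      | some (true, cs) => pvOuterB g fuel rest cs

def maxGuestsColoring_alt (dislikes : List (Int × Int)) : Int :=
  -- graph = defaultdict(set); for a, b in dislikes: graph[a].add(b); graph[b].add(a)
  let g := dislikes.foldl (fun g p =>
    (g.modify p.1 PySem.Set.empty (fun s => PySem.Set.add s p.2)).modify p.2
      PySem.Set.empty (fun s => PySem.Set.add s p.1)) PySem.Dict.empty
  match pvOuterB g (g.size + 2) g.keys PySem.Dict.empty with
  | none => 0      -- fuel exhaustion: proved unreachable
  | some (false, _) => 0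
  | some (true, colors) =>
    let red := (colors.values.filter (fun c => c == 1)).length
    max (red : Int) ((colors.size : Int) - (red : Int))

-- ===== PRECONDITION & SPEC =====
def Spec_maxGuestsColoring (dislikes : List (Int × Int)) (out : Int) : Prop := out = maxGuestsColoring_alt dislikes
instance (dislikes : List (Int × Int)) (out : Int) : Decidable (Spec_maxGuestsColoring dislikes out) := by unfold Spec_maxGuestsColoring; infer_instance

-- ===== CLAIM (what is proved, stated in full; the proofs are below) =====
def Claim_equal_maxGuestsColoring : Prop := ∀ (dislikes : List (Int × Int)), Dom_maxGuestsColoring dislikes → Spec_maxGuestsColoring dislikes (maxGuestsColoring dislikes)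


-- ===== LEMMAS AND PROOFS =====

-- adjacency lookup of the shared graph shape
def pvAdj (g : PySem.Dict Int (PySem.Set Int)) (v : Int) : List Int :=
  g.getD v PySem.Set.empty

-- the graph is symmetric and every endpoint of an edge is a key
def pvSym (g : PySem.Dict Int (PySem.Set Int)) : Prop :=
  ∀ v u, u ∈ pvAdj g v → v ∈ pvAdj g u ∧ u ∈ g.keys

-- parity-tagged reachability from s: pvDer adj s v c ⇔ some walk s → v forces colour c on v
inductive pvDer (adj : Int → List Int) (s : Int) : Int → Int → Prop
  | base : pvDer adj s s 1
  | step {v c u} : pvDer adj s v c → u ∈ adj v → pvDer adj s u (-c)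

-- an odd cycle through the component of s
def pvConfl (adj : Int → List Int) (s : Int) : Prop :=
  ∃ v, pvDer adj s v 1 ∧ pvDer adj s v (-1)

-- number of still-uncoloured graph keys
def pvUnc (g : PySem.Dict Int (PySem.Set Int)) (col : PySem.Dict Int Int) : Nat :=
  g.keys.countP (fun k => !col.contains k)

-- col extends col0 and every new entry is derivable from s
def pvRInv (adj : Int → List Int) (s : Int) (col0 col : PySem.Dict Int Int) : Prop :=
  col.keys.Nodup ∧
  (∀ v, col0.contains v = true → col.get? v = col0.get? v) ∧
  (∀ v c, col.get? v = some c → col0.contains v = true ∨ pvDer adj s v c)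

-- col' preserves everything of col
def pvExt (col col' : PySem.Dict Int Int) : Prop :=
  ∀ v, col.contains v = true → col'.get? v = col.get? v

-- vertices coloured after lo: closed and properly coloured
def pvPost (adj : Int → List Int) (lo col : PySem.Dict Int Int) : Prop :=
  ∀ v, col.contains v = true → lo.contains v = false →
    ∀ u ∈ adj v, ∃ cv, col.get? v = some cv ∧ col.get? u = some (-cv)

def pvClosed (adj : Int → List Int) (col : PySem.Dict Int Int) : Prop :=
  ∀ v, col.contains v = true → ∀ u ∈ adj v, col.contains u = true

lemma pvExt_refl (col : PySem.Dict Int Int) : pvExt col col := fun _ _ => rfl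

lemma pvExt_contains {col col' : PySem.Dict Int Int} (h : pvExt col col')
    {v : Int} (hv : col.contains v = true) : col'.contains v = true := by
  rw [PySem.Dict.contains_eq_isSome_get?] at hv ⊢
  rw [h v]; · exact hv
  · rw [PySem.Dict.contains_eq_isSome_get?]; exact hv

lemma pvExt_trans {a b c : PySem.Dict Int Int} (h1 : pvExt a b) (h2 : pvExt b c) :
    pvExt a c := by
  intro v hv
  rw [h2 v (pvExt_contains h1 hv), h1 v hv]

lemma pvPost_trans {adj : Int → List Int} {a b c : PySem.Dict Int Int}
    (h1 : pvPost adj a b) (h2 : pvPost adj b c) (hext : pvExt b c) :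
    pvPost adj a c := by
  intro v hv hva u hu
  by_cases hb : b.contains v = true
  · obtain ⟨cv, hcv, hcu⟩ := h1 v hb hva u hu
    have hub : b.contains u = true := by
      rw [PySem.Dict.contains_eq_isSome_get?, hcu]; rfl
    exact ⟨cv, by rw [hext v hb, hcv], by rw [hext u hub, hcu]⟩
  · exact h2 v hv (by simpa using hb) u hu

lemma pvDer_pm {adj : Int → List Int} {s v c : Int} (h : pvDer adj s v c) :
    c = 1 ∨ c = -1 := by
  induction h with
  | base => left; rfl
  | step _ _ ih => omega

lemma pvConfl_of_two {adj : Int → List Int} {s v c : Int}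
    (h1 : pvDer adj s v c) (h2 : pvDer adj s v (-c)) : pvConfl adj s := by
  rcases pvDer_pm h1 with rfl | rfl
  · exact ⟨v, h1, h2⟩
  · exact ⟨v, by simpa using h2, h1⟩

lemma pvOpp {c d : Int} (hc : c = 1 ∨ c = -1) (hd : d = 1 ∨ d = -1) (hne : d ≠ c) :
    d = -c := by omega

-- derivable vertices avoid a closed coloured set that misses s
lemma pvDer_fresh {g : PySem.Dict Int (PySem.Set Int)} (hsym : pvSym g)
    {col : PySem.Dict Int Int} (hcl : pvClosed (pvAdj g) col) {s : Int}
    (hs : col.contains s = false) {v c : Int} (h : pvDer (pvAdj g) s v c) :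
    col.contains v = false := by
  induction h with
  | base => exact hs
  | step hd hu ih =>
    by_contra hcon
    have hu' : col.contains _ = true := hcl _ (by simpa using hcon) _ (hsym _ _ hu).1
    rw [ih] at hu'; exact Bool.false_ne_true hu'

-- a successful run colours the whole component canonically and excludes conflicts
lemma pvCanon {g : PySem.Dict Int (PySem.Set Int)} {s : Int}
    {col0 col' : PySem.Dict Int Int}
    (hdisj : ∀ v c, pvDer (pvAdj g) s v c → col0.contains v = false)
    (hinv : pvRInv (pvAdj g) s col0 col')
    (hpost : pvPost (pvAdj g) col0 col')
    (hs : col'.get? s = some 1) :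
    (∀ v c, pvDer (pvAdj g) s v c → col'.get? v = some c) ∧ ¬ pvConfl (pvAdj g) s := by
  have hder : ∀ v c, pvDer (pvAdj g) s v c → col'.get? v = some c := by
    intro v c h
    induction h with
    | base => exact hs
    | @step w cw u hd hu ih =>
      have hw : col'.contains w = true := by
        rw [PySem.Dict.contains_eq_isSome_get?, ih]; rfl
      obtain ⟨cv, hcv, hcu⟩ := hpost w hw (hdisj _ _ hd) u hu
      rw [ih] at hcv
      cases hcv; exact hcu
  refine ⟨hder, ?_⟩
  rintro ⟨v, h1, h2⟩
  have := hder v 1 h1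
  have := hder v (-1) h2
  simp_all

-- counting: inserting a fresh key k ∈ l decrements the uncoloured count
lemma pvCountP_insert (l : List Int) (col : PySem.Dict Int Int) (k v : Int)
    (hnd : l.Nodup) (hk : k ∈ l) (hnc : col.contains k = false) :
    l.countP (fun x => !(col.insert k v).contains x) + 1 =
      l.countP (fun x => !col.contains x) := by
  induction l with
  | nil => cases hk
  | cons a t ih =>
    rw [List.nodup_cons] at hnd
    by_cases ha : a = k
    · subst ha
      have ht : t.countP (fun x => !(x == a) && !col.contains x) =
          t.countP (fun x => !col.contains x) := by
        apply List.countP_congr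
        intro x hx
        have hxa : (x == a) = false := by
          simp only [beq_eq_false_iff_ne]; rintro rfl; exact hnd.1 hx
        simp [hxa]
      simp only [List.countP_cons, PySem.Dict.contains_insert, hnc, Bool.not_or]
      simp [ht]
    · have hkt : k ∈ t := by
        rcases List.mem_cons.mp hk with h | h
        · exact absurd h.symm ha
        · exact h
      have hih := ih hnd.2 hkt
      simp only [PySem.Dict.contains_insert] at hih
      have hxa : (a == k) = false := by simpa using ha
      simp only [List.countP_cons, PySem.Dict.contains_insert, hxa, Bool.false_or]
      omega

lemma pvUnc_insert {g : PySem.Dict Int (PySem.Set Int)} (hnd : g.keys.Nodup)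
    {col : PySem.Dict Int Int} {k : Int} (v : Int) (hk : k ∈ g.keys)
    (hnc : col.contains k = false) :
    pvUnc g (col.insert k v) + 1 = pvUnc g col :=
  pvCountP_insert g.keys col k v hnd hk hnc

lemma pvUnc_mono {g : PySem.Dict Int (PySem.Set Int)} {col col' : PySem.Dict Int Int}
    (h : ∀ x, col.contains x = true → col'.contains x = true) :
    pvUnc g col' ≤ pvUnc g col := by
  apply List.countP_mono_left
  intro x _ hx
  simp only [Bool.not_eq_true'] at hx ⊢
  by_contra hc
  have := h x (by simpa using hc)
  simp_all

lemma pvContains_get? {col : PySem.Dict Int Int} {v : Int}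
    (h : col.contains v = true) : ∃ c, col.get? v = some c := by
  rw [PySem.Dict.contains_eq_isSome_get?] at h
  exact Option.isSome_iff_exists.mp h

-- ===== DFS (port A) meets the spec =====

def pvDfsAStmt (g : PySem.Dict Int (PySem.Set Int)) (s : Int) (col0 : PySem.Dict Int Int)
    (fuel : Nat) : Prop :=
  ∀ col person color,
    pvRInv (pvAdj g) s col0 col →
    pvDer (pvAdj g) s person color →
    person ∈ g.keys →
    col.contains person = false →
    pvUnc g col < fuel →
    ∃ ok col',
      pvDfsA g fuel col person color = some (ok, col') ∧
      pvRInv (pvAdj g) s col0 col' ∧ pvExt col col' ∧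
      col'.get? person = some color ∧
      (ok = false → pvConfl (pvAdj g) s) ∧
      (ok = true → pvPost (pvAdj g) col col')

lemma pvDfsLoopA_spec (g : PySem.Dict Int (PySem.Set Int)) (s : Int)
    (col0 : PySem.Dict Int Int)
    (hsym : pvSym g) (hnd : g.keys.Nodup)
    (hdisj : ∀ v c, pvDer (pvAdj g) s v c → col0.contains v = false)
    (fuel : Nat) (IH : pvDfsAStmt g s col0 fuel)
    (person color : Int) (hper : pvDer (pvAdj g) s person color) :
    ∀ enemies col,
      (∀ e ∈ enemies, e ∈ pvAdj g person) →
      pvRInv (pvAdj g) s col0 col →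
      col.get? person = some color →
      pvUnc g col < fuel →
      ∃ ok col',
        pvDfsLoopA g fuel enemies col color = some (ok, col') ∧
        pvRInv (pvAdj g) s col0 col' ∧ pvExt col col' ∧
        (ok = false → pvConfl (pvAdj g) s) ∧
        (ok = true → pvPost (pvAdj g) col col' ∧
          ∀ e ∈ enemies, col'.get? e = some (-color)) := by
  intro enemies
  induction enemies with
  | nil =>
    intro col _ hinv _ _
    refine ⟨true, col, by simp [pvDfsLoopA], hinv, pvExt_refl col, fun h => absurd h (by simp), fun _ => ?_⟩
    refine ⟨fun v hv hv' u hu => ?_, by simp⟩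
    rw [hv] at hv'; cases hv'
  | cons e rest ihl =>
    intro col hsub hinv hpc hunc
    have hin : e ∈ pvAdj g person := hsub e (List.mem_cons_self)
    have hderE : pvDer (pvAdj g) s e (-color) := pvDer.step hper hin
    have hE0 : col0.contains e = false := hdisj _ _ hderE
    have hcolpm : color = 1 ∨ color = -1 := pvDer_pm hper
    by_cases hc : col.contains e = true
    · obtain ⟨ce, hce⟩ := pvContains_get? hc
      have hceD : pvDer (pvAdj g) s e ce := by
        rcases hinv.2.2 e ce hce with h | h
        · rw [hE0] at h; cases h
        · exact h
      have hcepm : ce = 1 ∨ ce = -1 := pvDer_pm hceD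
      have hgd : col.getD e 0 = ce := by
        rw [PySem.Dict.getD_eq_get?_getD, hce]; rfl
      by_cases hcc : ce = color
      · refine ⟨false, col, ?_, hinv, pvExt_refl col, fun _ => ?_, fun h => absurd h (by simp)⟩
        · simp only [pvDfsLoopA, hc, if_true, hgd, hcc, beq_self_eq_true]
        · exact pvConfl_of_two (hcc ▸ hceD) hderE
      · have hsub' : ∀ x ∈ rest, x ∈ pvAdj g person :=
          fun x hx => hsub x (List.mem_cons_of_mem _ hx)
        obtain ⟨ok, col', heq, hinv', hext', hfail, hsucc⟩ :=
          ihl col hsub' hinv hpc hunc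
        refine ⟨ok, col', ?_, hinv', hext', hfail, fun h => ?_⟩
        · have hbeq : (col.getD e 0 == color) = false := by
            simp [hgd, hcc]
          simp only [pvDfsLoopA, hc, if_true, hbeq, Bool.false_eq_true, if_false]
          exact heq
        · obtain ⟨hpost, henem⟩ := hsucc h
          refine ⟨hpost, fun x hx => ?_⟩
          rcases List.mem_cons.mp hx with rfl | hx'
          · rw [hext' x hc, hce, pvOpp hcolpm hcepm hcc]
          · exact henem x hx'
    · have hcF : col.contains e = false := by simpa using hc
      have hek : e ∈ g.keys := (hsym person e hin).2
      obtain ⟨ok2, cs, heq2, hinv2, hext2, hgete, hfail2, hsucc2⟩ :=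
        IH col e (-color) hinv hderE hek hcF hunc
      cases ok2 with
      | false =>
        refine ⟨false, cs, ?_, hinv2, hext2, fun _ => hfail2 rfl, fun h => absurd h (by simp)⟩
        simp only [pvDfsLoopA, hcF, Bool.false_eq_true, if_false, heq2]
      | true =>
        have hcsperson : cs.get? person = some color := by
          have hpcont : col.contains person = true := by
            rw [PySem.Dict.contains_eq_isSome_get?, hpc]; rfl
          rw [hext2 person hpcont, hpc]
        have hunc2 : pvUnc g cs < fuel :=
          lt_of_le_of_lt (pvUnc_mono (fun x hx => pvExt_contains hext2 hx)) hunc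
        obtain ⟨ok, col', heq3, hinv', hext3, hfail3, hsucc3⟩ :=
          ihl cs (fun x hx => hsub x (List.mem_cons_of_mem _ hx)) hinv2 hcsperson hunc2
        refine ⟨ok, col', ?_, hinv', pvExt_trans hext2 hext3, hfail3, fun h => ?_⟩
        · simp only [pvDfsLoopA, hcF, Bool.false_eq_true, if_false, heq2]
          exact heq3
        · obtain ⟨hpost3, henem3⟩ := hsucc3 h
          have hpost1 : pvPost (pvAdj g) col cs := hsucc2 rfl
          refine ⟨pvPost_trans hpost1 hpost3 hext3, fun x hx => ?_⟩
          rcases List.mem_cons.mp hx with rfl | hx'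
          · have : cs.contains x = true := by
              rw [PySem.Dict.contains_eq_isSome_get?, hgete]; rfl
            rw [hext3 x this, hgete]
          · exact henem3 x hx'

lemma pvDfsA_spec (g : PySem.Dict Int (PySem.Set Int)) (s : Int)
    (col0 : PySem.Dict Int Int)
    (hsym : pvSym g) (hnd : g.keys.Nodup)
    (hdisj : ∀ v c, pvDer (pvAdj g) s v c → col0.contains v = false) :
    ∀ fuel, pvDfsAStmt g s col0 fuel := by
  intro fuel
  induction fuel with
  | zero => intro col person color _ _ _ _ hunc; omega
  | succ fuel IH =>
    intro col person color hinv hder hpk hpc hunc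
    have h0p : col0.contains person = false := hdisj _ _ hder
    set col1 := col.insert person color with hcol1
    have hinv1 : pvRInv (pvAdj g) s col0 col1 := by
      refine ⟨PySem.Dict.nodup_keys_insert _ _ _ hinv.1, fun v hv => ?_, fun v c hvc => ?_⟩
      · have hvp : v ≠ person := by rintro rfl; rw [h0p] at hv; cases hv
        rw [hcol1, PySem.Dict.get?_insert_of_ne _ _ hvp]
        exact hinv.2.1 v hv
      · by_cases hvp : v = person
        · subst hvp
          rw [hcol1, PySem.Dict.get?_insert_self] at hvc
          cases hvc
          exact Or.inr hder
        · rw [hcol1, PySem.Dict.get?_insert_of_ne _ _ hvp] at hvc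
          exact hinv.2.2 v c hvc
    have hext1 : pvExt col col1 := by
      intro v hv
      have hvp : v ≠ person := by rintro rfl; rw [hpc] at hv; cases hv
      rw [hcol1, PySem.Dict.get?_insert_of_ne _ _ hvp]
    have hunc1 : pvUnc g col1 + 1 = pvUnc g col := pvUnc_insert hnd color hpk hpc
    have hunc1' : pvUnc g col1 < fuel := by omega
    have hpc1 : col1.get? person = some color := by
      rw [hcol1, PySem.Dict.get?_insert_self]
    obtain ⟨ok, col', heq, hinv', hext', hfail, hsucc⟩ :=
      pvDfsLoopA_spec g s col0 hsym hnd hdisj fuel IH person color hder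
        (pvAdj g person) col1 (fun x hx => hx) hinv1 hpc1 hunc1'
    have hp1cont : col1.contains person = true := by
      rw [PySem.Dict.contains_eq_isSome_get?, hpc1]; rfl
    refine ⟨ok, col', ?_, hinv', pvExt_trans hext1 hext', ?_, hfail, fun h => ?_⟩
    · simp only [pvDfsA]
      exact heq
    · rw [hext' person hp1cont, hpc1]
    · obtain ⟨hpost, henem⟩ := hsucc h
      intro v hv hv' u hu
      by_cases hvp : v = person
      · subst hvp
        exact ⟨color, by rw [hext' v hp1cont, hpc1], henem u hu⟩
      · have hv1 : col1.contains v = false := by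
          rw [hcol1, PySem.Dict.contains_insert]
          simp [hvp, hv']
        exact hpost v hv hv1 u hu

-- ===== BFS (port B) meets the spec =====

lemma pvBfsScanB_spec (g : PySem.Dict Int (PySem.Set Int)) (s : Int)
    (col0 : PySem.Dict Int Int)
    (hsym : pvSym g) (hnd : g.keys.Nodup)
    (hdisj : ∀ v c, pvDer (pvAdj g) s v c → col0.contains v = false)
    (v cv : Int) (hder : pvDer (pvAdj g) s v cv) :
    ∀ us col q,
      (∀ u ∈ us, u ∈ pvAdj g v) →
      pvRInv (pvAdj g) s col0 col →
      col.get? v = some cv →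
      (∀ x ∈ q, col.contains x = true ∧ col0.contains x = false ∧
        (∃ cx, col.get? x = some cx ∧ pvDer (pvAdj g) s x cx)) →
      q.Nodup →
      (match pvBfsScanB v us col q with
       | none => pvConfl (pvAdj g) s
       | some (col', q') =>
          pvRInv (pvAdj g) s col0 col' ∧ pvExt col col' ∧
          col'.get? v = some cv ∧
          (∀ u ∈ us, col'.get? u = some (-cv)) ∧
          (∀ x, col'.contains x = true → col.contains x = true ∨ x ∈ q') ∧
          q'.Nodup ∧
          (∀ x ∈ q', col'.contains x = true ∧ col0.contains x = false ∧
            (∃ cx, col'.get? x = some cx ∧ pvDer (pvAdj g) s x cx)) ∧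
          (∃ ext, q' = q ++ ext) ∧
          q'.length + pvUnc g col' = q.length + pvUnc g col) := by
  intro us
  induction us with
  | nil =>
    intro col q _ hinv hcv hq hqnd
    have hred : pvBfsScanB v [] col q = some (col, q) := rfl
    rw [hred]
    exact ⟨hinv, pvExt_refl col, hcv, fun u hu => by simp at hu, fun x hx => Or.inl hx,
      hqnd, hq, ⟨[], (List.append_nil q).symm⟩, rfl⟩
  | cons u rest ih =>
    intro col q hsub hinv hcv hq hqnd
    have hin : u ∈ pvAdj g v := hsub u List.mem_cons_self
    have hderU : pvDer (pvAdj g) s u (-cv) := pvDer.step hder hin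
    have hU0 : col0.contains u = false := hdisj _ _ hderU
    have hcvpm : cv = 1 ∨ cv = -1 := pvDer_pm hder
    have hvc : col.contains v = true := by
      rw [PySem.Dict.contains_eq_isSome_get?, hcv]; rfl
    have hgdv : col.getD v 0 = cv := by
      rw [PySem.Dict.getD_eq_get?_getD, hcv]; rfl
    have hsub' : ∀ x ∈ rest, x ∈ pvAdj g v :=
      fun x hx => hsub x (List.mem_cons_of_mem _ hx)
    by_cases hc : col.contains u = true
    · obtain ⟨cu, hcu⟩ := pvContains_get? hc
      have hcuD : pvDer (pvAdj g) s u cu := by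
        rcases hinv.2.2 u cu hcu with h | h
        · rw [hU0] at h; cases h
        · exact h
      have hcupm : cu = 1 ∨ cu = -1 := pvDer_pm hcuD
      have hgdu : col.getD u 0 = cu := by
        rw [PySem.Dict.getD_eq_get?_getD, hcu]; rfl
      by_cases hcc : cu = cv
      · have hbeq : (col.getD u 0 == col.getD v 0) = true := by
          simp [hgdu, hgdv, hcc]
        simp only [pvBfsScanB, hc, if_true, hbeq]
        exact pvConfl_of_two (hcc ▸ hcuD) hderU
      · have hbeq : (col.getD u 0 == col.getD v 0) = false := by
          simp [hgdu, hgdv, hcc]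
        simp only [pvBfsScanB, hc, if_true, hbeq, Bool.false_eq_true, if_false]
        have hres := ih col q hsub' hinv hcv hq hqnd
        cases hES : pvBfsScanB v rest col q with
        | none => rw [hES] at hres; exact hres
        | some p =>
          obtain ⟨col', q'⟩ := p
          rw [hES] at hres
          obtain ⟨h1, h2, h3, h4, h5, h6, h7, h8, h9⟩ := hres
          refine ⟨h1, h2, h3, fun x hx => ?_, h5, h6, h7, h8, h9⟩
          rcases List.mem_cons.mp hx with rfl | hx'
          · rw [h2 x hc, hcu, pvOpp hcvpm hcupm hcc]
          · exact h4 x hx'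
    · have hcF : col.contains u = false := by simpa using hc
      have hek : u ∈ g.keys := (hsym v u hin).2
      have huv : u ≠ v := by rintro rfl; rw [hvc] at hcF; cases hcF
      set col2 := col.insert u (-cv) with hcol2
      have hinv2 : pvRInv (pvAdj g) s col0 col2 := by
        refine ⟨PySem.Dict.nodup_keys_insert _ _ _ hinv.1, fun x hx => ?_, fun x c hxc => ?_⟩
        · have hxu : x ≠ u := by rintro rfl; rw [hU0] at hx; cases hx
          rw [hcol2, PySem.Dict.get?_insert_of_ne _ _ hxu]
          exact hinv.2.1 x hx
        · by_cases hxu : x = u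
          · subst hxu
            rw [hcol2, PySem.Dict.get?_insert_self] at hxc
            cases hxc
            exact Or.inr hderU
          · rw [hcol2, PySem.Dict.get?_insert_of_ne _ _ hxu] at hxc
            exact hinv.2.2 x c hxc
      have hext2 : pvExt col col2 := by
        intro x hx
        have hxu : x ≠ u := by rintro rfl; rw [hcF] at hx; cases hx
        rw [hcol2, PySem.Dict.get?_insert_of_ne _ _ hxu]
      have hcv2 : col2.get? v = some cv := by
        rw [hcol2, PySem.Dict.get?_insert_of_ne _ _ huv.symm]; exact hcv
      have hgetu2 : col2.get? u = some (-cv) := by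
        rw [hcol2, PySem.Dict.get?_insert_self]
      have hunotq : u ∉ q := fun hx => by
        have := (hq u hx).1; rw [hcF] at this; cases this
      have hq2 : ∀ x ∈ q ++ [u], col2.contains x = true ∧ col0.contains x = false ∧
          (∃ cx, col2.get? x = some cx ∧ pvDer (pvAdj g) s x cx) := by
        intro x hx
        rcases List.mem_append.mp hx with hx' | hx'
        · obtain ⟨ha, hb, cx, hcx, hdx⟩ := hq x hx'
          exact ⟨pvExt_contains hext2 ha, hb, cx, by rw [hext2 x ha]; exact hcx, hdx⟩
        · rw [List.mem_singleton.mp hx']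
          refine ⟨?_, hU0, ⟨-cv, hgetu2, hderU⟩⟩
          rw [PySem.Dict.contains_eq_isSome_get?, hgetu2]; rfl
      have hq2nd : (q ++ [u]).Nodup :=
        List.Nodup.append hqnd (List.nodup_singleton u)
          (fun {a} ha hb => hunotq ((List.mem_singleton.mp hb) ▸ ha))
      have hunc2 : pvUnc g col2 + 1 = pvUnc g col := pvUnc_insert hnd (-cv) hek hcF
      have hres := ih col2 (q ++ [u]) hsub' hinv2 hcv2 hq2 hq2nd
      have hstep : pvBfsScanB v (u :: rest) col q =
          pvBfsScanB v rest col2 (q ++ [u]) := by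
        simp only [pvBfsScanB, hcF, Bool.false_eq_true, if_false, hgdv, hcol2]
      rw [hstep]
      cases hES : pvBfsScanB v rest col2 (q ++ [u]) with
      | none => rw [hES] at hres; exact hres
      | some p =>
        obtain ⟨col', q'⟩ := p
        rw [hES] at hres
        obtain ⟨h1, h2, h3, h4, h5, h6, h7, ⟨ext, hext⟩, h9⟩ := hres
        refine ⟨h1, pvExt_trans hext2 h2, h3, fun x hx => ?_, fun x hx => ?_, h6, h7,
          ⟨u :: ext, by simp [hext]⟩, ?_⟩
        · rcases List.mem_cons.mp hx with rfl | hx'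
          · have : col2.contains x = true := by
              rw [PySem.Dict.contains_eq_isSome_get?, hgetu2]; rfl
            rw [h2 x this, hgetu2]
          · exact h4 x hx'
        · rcases h5 x hx with hx' | hx'
          · rw [hcol2, PySem.Dict.contains_insert] at hx'
            rcases Bool.or_eq_true_iff.mp hx' with hx'' | hx''
            · right
              have : x = u := by simpa using hx''
              subst this
              rw [hext]; simp
            · exact Or.inl hx''
          · exact Or.inr hx'
        · simp only [List.length_append, List.length_singleton] at h9
          omega

def pvQPost (adj : Int → List Int) (col0 col : PySem.Dict Int Int) (q : List Int) : Prop :=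
  ∀ x, col.contains x = true → col0.contains x = false → x ∉ q →
    ∀ u ∈ adj x, ∃ cx, col.get? x = some cx ∧ col.get? u = some (-cx)

lemma pvBfsB_spec (g : PySem.Dict Int (PySem.Set Int)) (s : Int)
    (col0 : PySem.Dict Int Int)
    (hsym : pvSym g) (hnd : g.keys.Nodup)
    (hdisj : ∀ v c, pvDer (pvAdj g) s v c → col0.contains v = false) :
    ∀ fuel col q,
      pvRInv (pvAdj g) s col0 col →
      (∀ x ∈ q, col.contains x = true ∧ col0.contains x = false ∧
        (∃ cx, col.get? x = some cx ∧ pvDer (pvAdj g) s x cx)) →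
      q.Nodup →
      pvQPost (pvAdj g) col0 col q →
      q.length + pvUnc g col < fuel →
      ∃ ok col',
        pvBfsB g fuel col q = some (ok, col') ∧
        (ok = false → pvConfl (pvAdj g) s) ∧
        (ok = true → pvRInv (pvAdj g) s col0 col' ∧ pvExt col col' ∧
          pvPost (pvAdj g) col0 col') := by
  intro fuel
  induction fuel with
  | zero => intro col q _ _ _ _ hf; omega
  | succ fuel IH =>
    intro col q hinv hq hqnd hqpost hf
    cases q with
    | nil =>
      exact ⟨true, col, rfl, fun h => absurd h (by simp),
        fun _ => ⟨hinv, pvExt_refl col,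
          fun x hx hx0 u hu => hqpost x hx hx0 (by simp) u hu⟩⟩
    | cons v qs =>
      obtain ⟨hvc, hv0, cv, hcv, hderv⟩ := hq v List.mem_cons_self
      have hqs : ∀ x ∈ qs, col.contains x = true ∧ col0.contains x = false ∧
          (∃ cx, col.get? x = some cx ∧ pvDer (pvAdj g) s x cx) :=
        fun x hx => hq x (List.mem_cons_of_mem _ hx)
      have hqsnd : qs.Nodup := (List.nodup_cons.mp hqnd).2
      have hscan := pvBfsScanB_spec g s col0 hsym hnd hdisj v cv hderv
        (pvAdj g v) col qs (fun x hx => hx) hinv hcv hqs hqsnd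
      cases hES : pvBfsScanB v (pvAdj g v) col qs with
      | none =>
        rw [hES] at hscan
        refine ⟨false, col, ?_, fun _ => hscan, fun h => absurd h (by simp)⟩
        show pvBfsB g (fuel + 1) col (v :: qs) = some (false, col)
        simp only [pvBfsB]
        rw [show g.getD v PySem.Set.empty = pvAdj g v from rfl, hES]
      | some p =>
        obtain ⟨col2, q2⟩ := p
        rw [hES] at hscan
        obtain ⟨h1, h2, h3, h4, h5, h6, h7, ⟨ext, hx8⟩, h9⟩ := hscan
        have hqpost2 : pvQPost (pvAdj g) col0 col2 q2 := by
          intro x hx hx0 hxq u hu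
          rcases h5 x hx with hxc | hxc
          · by_cases hxv : x = v
            · subst hxv
              exact ⟨cv, h3, h4 u hu⟩
            · have hxq' : x ∉ v :: qs := by
                intro hmem
                rcases List.mem_cons.mp hmem with rfl | hmem'
                · exact hxv rfl
                · exact hxq (hx8 ▸ List.mem_append.mpr (Or.inl hmem'))
              obtain ⟨cx, hcx, hcu⟩ := hqpost x hxc hx0 hxq' u hu
              have hucol : col.contains u = true := by
                rw [PySem.Dict.contains_eq_isSome_get?, hcu]; rfl
              exact ⟨cx, by rw [h2 x hxc]; exact hcx, by rw [h2 u hucol]; exact hcu⟩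
          · exact absurd hxc hxq
        have hf2 : q2.length + pvUnc g col2 < fuel := by
          simp only [List.length_cons] at hf; omega
        obtain ⟨ok, col', heq, hfail, hsucc⟩ := IH col2 q2 h1 h7 h6 hqpost2 hf2
        refine ⟨ok, col', ?_, hfail, fun h => ?_⟩
        · show pvBfsB g (fuel + 1) col (v :: qs) = some (ok, col')
          simp only [pvBfsB]
          rw [show g.getD v PySem.Set.empty = pvAdj g v from rfl, hES]
          exact heq
        · obtain ⟨hi1, hi2, hi3⟩ := hsucc h
          exact ⟨hi1, pvExt_trans h2 hi2, hi3⟩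

-- ===== graph construction facts =====

lemma pvBuild_step (g : PySem.Dict Int (PySem.Set Int)) (a b : Int)
    (hsym : pvSym g) (hnd : g.keys.Nodup) :
    pvSym ((g.modify a PySem.Set.empty (fun s => PySem.Set.add s b)).modify b
      PySem.Set.empty (fun s => PySem.Set.add s a)) ∧
    ((g.modify a PySem.Set.empty (fun s => PySem.Set.add s b)).modify b
      PySem.Set.empty (fun s => PySem.Set.add s a)).keys.Nodup := by
  set g1 := g.modify a PySem.Set.empty (fun s => PySem.Set.add s b) with hg1
  set g2 := g1.modify b PySem.Set.empty (fun s => PySem.Set.add s a) with hg2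
  have hadj : ∀ v u, u ∈ pvAdj g2 v ↔ u ∈ pvAdj g v ∨ (v = a ∧ u = b) ∨ (v = b ∧ u = a) := by
    intro v u
    have e2 : u ∈ pvAdj g2 v ↔ u ∈ pvAdj g1 v ∨ (v = b ∧ u = a) := by
      unfold pvAdj
      rw [hg2, PySem.Dict.getD_modify]
      by_cases h : v = b
      · subst h
        simp [PySem.Set.mem_add]
      · simp [h]
    have e1 : u ∈ pvAdj g1 v ↔ u ∈ pvAdj g v ∨ (v = a ∧ u = b) := by
      unfold pvAdj
      rw [hg1, PySem.Dict.getD_modify]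
      by_cases h : v = a
      · subst h
        simp [PySem.Set.mem_add]
      · simp [h]
    rw [e2, e1]
    tauto
  have hkeys : ∀ v, v ∈ g2.keys ↔ v ∈ g.keys ∨ v = a ∨ v = b := by
    intro v
    rw [← PySem.Dict.contains_iff_mem_keys, ← PySem.Dict.contains_iff_mem_keys]
    simp only [hg2, hg1, PySem.Dict.contains_modify]
    simp only [Bool.or_eq_true, beq_iff_eq]
    tauto
  constructor
  · intro v u hu
    rcases (hadj v u).mp hu with h | ⟨rfl, rfl⟩ | ⟨rfl, rfl⟩
    · obtain ⟨h1, h2⟩ := hsym v u h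
      exact ⟨(hadj u v).mpr (Or.inl h1), (hkeys u).mpr (Or.inl h2)⟩
    · exact ⟨(hadj u v).mpr (Or.inr (Or.inr ⟨rfl, rfl⟩)), (hkeys u).mpr (Or.inr (Or.inr rfl))⟩
    · exact ⟨(hadj u v).mpr (Or.inr (Or.inl ⟨rfl, rfl⟩)), (hkeys u).mpr (Or.inr (Or.inl rfl))⟩
  · have hnd1 : g1.keys.Nodup := by
      rw [hg1, PySem.Dict.keys_modify]
      by_cases hca : g.contains a = true
      · rw [PySem.Dict.keys_insert_of_contains _ _ hca]; exact hnd
      · rw [PySem.Dict.keys_insert_of_not_contains _ _ (by simpa using hca)]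
        simp only [List.nodup_append, List.nodup_singleton, true_and, hnd]
        intro x hx y hy
        rw [List.mem_singleton.mp hy]
        rintro rfl
        exact hca ((PySem.Dict.contains_iff_mem_keys _ _).mpr hx)
    rw [hg2, PySem.Dict.keys_modify]
    by_cases hcb : g1.contains b = true
    · rw [PySem.Dict.keys_insert_of_contains _ _ hcb]; exact hnd1
    · rw [PySem.Dict.keys_insert_of_not_contains _ _ (by simpa using hcb)]
      simp only [List.nodup_append, List.nodup_singleton, true_and, hnd1]
      intro x hx y hy
      rw [List.mem_singleton.mp hy]
      rintro rfl
      exact hcb ((PySem.Dict.contains_iff_mem_keys _ _).mpr hx)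

lemma pvBuild_facts (dislikes : List (Int × Int)) :
    pvSym (pvBuildGraphA dislikes) ∧ (pvBuildGraphA dislikes).keys.Nodup := by
  suffices h : ∀ (l : List (Int × Int)) (g : PySem.Dict Int (PySem.Set Int)), pvSym g → g.keys.Nodup →
      pvSym (l.foldl (fun g p =>
        (g.modify p.1 PySem.Set.empty (fun s => PySem.Set.add s p.2)).modify p.2
          PySem.Set.empty (fun s => PySem.Set.add s p.1)) g) ∧
      (l.foldl (fun g p =>
        (g.modify p.1 PySem.Set.empty (fun s => PySem.Set.add s p.2)).modify p.2
          PySem.Set.empty (fun s => PySem.Set.add s p.1)) g).keys.Nodup by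
    refine h dislikes PySem.Dict.empty ?_ PySem.Dict.nodup_keys_empty
    intro v u hu
    simp only [pvAdj, PySem.Dict.getD_eq_get?_getD, PySem.Dict.get?_empty] at hu
    cases hu
  intro l
  induction l with
  | nil => intro g h1 h2; exact ⟨h1, h2⟩
  | cons p rest ih =>
    intro g h1 h2
    simp only [List.foldl_cons]
    obtain ⟨h1', h2'⟩ := pvBuild_step g p.1 p.2 h1 h2
    exact ih _ h1' h2'

-- ===== outer loops agree =====

lemma pvKeysLen (d : PySem.Dict Int Int) : d.keys.length = d.size := by
  simp [PySem.Dict.keys, PySem.Dict.size]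

lemma pvSetKeysLen (d : PySem.Dict Int (PySem.Set Int)) : d.keys.length = d.size := by
  simp [PySem.Dict.keys, PySem.Dict.size]

lemma pvUnc_le (g : PySem.Dict Int (PySem.Set Int)) (col : PySem.Dict Int Int) :
    pvUnc g col ≤ g.size := by
  rw [← pvSetKeysLen]
  exact List.countP_le_length

lemma pvOuter_eq (g : PySem.Dict Int (PySem.Set Int))
    (hsym : pvSym g) (hnd : g.keys.Nodup) :
    ∀ ks colA colB,
      (∀ k ∈ ks, k ∈ g.keys) →
      colA.keys.Nodup → colB.keys.Nodup →
      pvClosed (pvAdj g) colA →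
      (∀ v c, colA.get? v = some c → c = 1 ∨ c = -1) →
      (∀ v, colB.get? v = colA.get? v) →
      ∃ okA cA okB cB,
        pvOuterA g (g.size + 2) ks colA = some (okA, cA) ∧
        pvOuterB g (g.size + 2) ks colB = some (okB, cB) ∧
        okA = okB ∧
        (okA = true →
          cA.keys.Nodup ∧ cB.keys.Nodup ∧
          (∀ v, cB.get? v = cA.get? v) ∧
          (∀ v c, cA.get? v = some c → c = 1 ∨ c = -1)) := by
  intro ks
  induction ks with
  | nil =>
    intro colA colB _ hndA hndB _ hpm hBA
    exact ⟨true, colA, true, colB, rfl, rfl, rfl, fun _ => ⟨hndA, hndB, hBA, hpm⟩⟩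
  | cons p ks ih =>
    intro colA colB hks hndA hndB hclosed hpm hBA
    have hks' : ∀ k ∈ ks, k ∈ g.keys := fun k hk => hks k (List.mem_cons_of_mem _ hk)
    have hconteq : ∀ x, colB.contains x = colA.contains x := by
      intro x
      rw [PySem.Dict.contains_eq_isSome_get?, PySem.Dict.contains_eq_isSome_get?, hBA x]
    by_cases hpc : colA.contains p = true
    · obtain ⟨okA, cA, okB, cB, hA, hB, hok, hres⟩ := ih colA colB hks' hndA hndB hclosed hpm hBA
      refine ⟨okA, cA, okB, cB, ?_, ?_, hok, hres⟩
      · simp only [pvOuterA, hpc, if_true]; exact hA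
      · simp only [pvOuterB, hconteq p, hpc, if_true]; exact hB
    · have hpcF : colA.contains p = false := by simpa using hpc
      have hBpcF : colB.contains p = false := by rw [hconteq p]; exact hpcF
      have hpk : p ∈ g.keys := hks p List.mem_cons_self
      have hdisjA : ∀ v c, pvDer (pvAdj g) p v c → colA.contains v = false :=
        fun v c h => pvDer_fresh hsym hclosed hpcF h
      have hdisjB : ∀ v c, pvDer (pvAdj g) p v c → colB.contains v = false :=
        fun v c h => by rw [hconteq v]; exact hdisjA v c h
      -- DFS on the A side
      have hRA : pvRInv (pvAdj g) p colA colA := by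
        refine ⟨hndA, fun v _ => rfl, fun v c hvc => Or.inl ?_⟩
        rw [PySem.Dict.contains_eq_isSome_get?, hvc]; rfl
      have huncA : pvUnc g colA < g.size + 2 :=
        lt_of_le_of_lt (pvUnc_le g colA) (by omega)
      obtain ⟨okA', cA', heqA, hinvA', hextA', hgetpA, hfailA, hsuccA⟩ :=
        pvDfsA_spec g p colA hsym hnd hdisjA (g.size + 2) colA p 1 hRA pvDer.base hpk hpcF huncA
      -- BFS on the B side
      set colB1 := colB.insert p 1 with hcolB1
      have hRB1 : pvRInv (pvAdj g) p colB colB1 := by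
        refine ⟨PySem.Dict.nodup_keys_insert _ _ _ hndB, fun v hv => ?_, fun v c hvc => ?_⟩
        · have hvp : v ≠ p := by rintro rfl; rw [hBpcF] at hv; cases hv
          rw [hcolB1, PySem.Dict.get?_insert_of_ne _ _ hvp]
        · by_cases hvp : v = p
          · subst hvp
            rw [hcolB1, PySem.Dict.get?_insert_self] at hvc
            cases hvc
            exact Or.inr pvDer.base
          · rw [hcolB1, PySem.Dict.get?_insert_of_ne _ _ hvp] at hvc
            exact Or.inl (by rw [PySem.Dict.contains_eq_isSome_get?, hvc]; rfl)
      have hgetpB1 : colB1.get? p = some 1 := by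
        rw [hcolB1, PySem.Dict.get?_insert_self]
      have hcontpB1 : colB1.contains p = true := by
        rw [PySem.Dict.contains_eq_isSome_get?, hgetpB1]; rfl
      have hq1 : ∀ x ∈ [p], colB1.contains x = true ∧ colB.contains x = false ∧
          (∃ cx, colB1.get? x = some cx ∧ pvDer (pvAdj g) p x cx) := by
        intro x hx
        rw [List.mem_singleton.mp hx]
        exact ⟨hcontpB1, hBpcF, 1, hgetpB1, pvDer.base⟩
      have hQPost1 : pvQPost (pvAdj g) colB colB1 [p] := by
        intro x hx hx0 hxq _ _
        rw [hcolB1, PySem.Dict.contains_insert] at hx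
        rcases Bool.or_eq_true_iff.mp hx with hx' | hx'
        · exact absurd (List.mem_singleton.mpr (by simpa using hx')) hxq
        · rw [hx0] at hx'; cases hx'
      have huncB1 : pvUnc g colB1 + 1 = pvUnc g colB := pvUnc_insert hnd 1 hpk hBpcF
      have huncBA : pvUnc g colB = pvUnc g colA := by
        apply List.countP_congr
        intro x _
        rw [hconteq x]
      have hfB : [p].length + pvUnc g colB1 < g.size + 2 := by
        have := pvUnc_le g colA
        simp only [List.length_singleton]
        omega
      obtain ⟨okB', cB', heqB, hfailB, hsuccB⟩ :=
        pvBfsB_spec g p colB hsym hnd hdisjB (g.size + 2) colB1 [p] hRB1 hq1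
          (List.nodup_singleton p) hQPost1 hfB
      -- the two runs fail or succeed together
      have hunfA : pvOuterA g (g.size + 2) (p :: ks) colA =
          (match pvDfsA g (g.size + 2) colA p 1 with
           | none => none
           | some (false, cs) => some (false, cs)
           | some (true, cs) => pvOuterA g (g.size + 2) ks cs) := by
        simp only [pvOuterA, hpcF, Bool.false_eq_true, if_false]
      have hunfB : pvOuterB g (g.size + 2) (p :: ks) colB =
          (match pvBfsB g (g.size + 2) (colB.insert p 1) [p] with
           | none => none
           | some (false, cs) => some (false, cs)
           | some (true, cs) => pvOuterB g (g.size + 2) ks cs) := by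
        simp only [pvOuterB, hBpcF, Bool.false_eq_true, if_false]
      cases okA' with
      | false =>
        cases okB' with
        | false =>
          refine ⟨false, cA', false, cB', ?_, ?_, rfl, fun h => absurd h (by simp)⟩
          · rw [hunfA, heqA]
          · rw [hunfB, ← hcolB1, heqB]
        | true =>
          obtain ⟨hinvB', hextB', hpostB⟩ := hsuccB rfl
          have hgetpB : cB'.get? p = some 1 := by
            rw [hextB' p hcontpB1]; exact hgetpB1
          have hnoConfl := (pvCanon hdisjB hinvB' hpostB hgetpB).2
          exact absurd (hfailA rfl) hnoConfl
      | true =>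
        have hpostA' := hsuccA rfl
        have hcanA := pvCanon hdisjA hinvA' hpostA' hgetpA
        cases okB' with
        | false => exact absurd (hfailB rfl) hcanA.2
        | true =>
          obtain ⟨hinvB', hextB', hpostB⟩ := hsuccB rfl
          have hgetpB : cB'.get? p = some 1 := by
            rw [hextB' p hcontpB1]; exact hgetpB1
          have hcanB := pvCanon hdisjB hinvB' hpostB hgetpB
          -- the two resulting colourings agree pointwise
          have hBA' : ∀ v, cB'.get? v = cA'.get? v := by
            intro v
            by_cases hvd : ∃ c, pvDer (pvAdj g) p v c
            · obtain ⟨c, hc⟩ := hvd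
              rw [hcanA.1 v c hc, hcanB.1 v c hc]
            · have hAold : cA'.get? v = colA.get? v := by
                cases hA : cA'.get? v with
                | some c =>
                  rcases hinvA'.2.2 v c hA with hold | hder
                  · rw [← hA, hextA' v hold]
                  · exact absurd ⟨c, hder⟩ hvd
                | none =>
                  cases hA2 : colA.get? v with
                  | some c =>
                    have : colA.contains v = true := by
                      rw [PySem.Dict.contains_eq_isSome_get?, hA2]; rfl
                    rw [hextA' v this, hA2] at hA
                    cases hA
                  | none => rfl
              have hBold : cB'.get? v = colB.get? v := by
                have hextB1 : pvExt colB colB1 := by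
                  intro x hx
                  have hxp : x ≠ p := by rintro rfl; rw [hBpcF] at hx; cases hx
                  rw [hcolB1, PySem.Dict.get?_insert_of_ne _ _ hxp]
                have hextBB : pvExt colB cB' := pvExt_trans hextB1 hextB'
                cases hB : cB'.get? v with
                | some c =>
                  rcases hinvB'.2.2 v c hB with hold | hder
                  · rw [← hB, hextBB v hold]
                  · exact absurd ⟨c, hder⟩ hvd
                | none =>
                  cases hB2 : colB.get? v with
                  | some c =>
                    have : colB.contains v = true := by
                      rw [PySem.Dict.contains_eq_isSome_get?, hB2]; rfl
                    rw [hextBB v this, hB2] at hB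
                    cases hB
                  | none => rfl
              rw [hAold, hBold, hBA v]
          have hclosed' : pvClosed (pvAdj g) cA' := by
            intro x hx u hu
            obtain ⟨cx, hcx⟩ := pvContains_get? hx
            rcases hinvA'.2.2 x cx hcx with hold | hder
            · exact pvExt_contains hextA' (hclosed x hold u hu)
            · obtain ⟨cv, _, hcu⟩ := hpostA' x hx (hdisjA _ _ hder) u hu
              rw [PySem.Dict.contains_eq_isSome_get?, hcu]; rfl
          have hpm' : ∀ v c, cA'.get? v = some c → c = 1 ∨ c = -1 := by
            intro v c hvc
            rcases hinvA'.2.2 v c hvc with hold | hder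
            · rw [hextA' v hold] at hvc
              exact hpm v c hvc
            · exact pvDer_pm hder
          obtain ⟨okA, cA, okB, cB, hA, hB, hok, hres⟩ :=
            ih cA' cB' hks' hinvA'.1 hinvB'.1 hclosed' hpm' hBA'
          refine ⟨okA, cA, okB, cB, ?_, ?_, hok, hres⟩
          · rw [hunfA, heqA]; exact hA
          · rw [hunfB, ← hcolB1, heqB]; exact hB

-- ===== final counting =====

lemma pvCount_eq (cA cB : PySem.Dict Int Int)
    (hndA : cA.keys.Nodup) (hndB : cB.keys.Nodup)
    (hBA : ∀ v, cB.get? v = cA.get? v)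
    (hpm : ∀ v c, cA.get? v = some c → c = 1 ∨ c = -1) :
    ((max ((cA.values.filter (fun c => c == 1)).length)
          ((cA.values.filter (fun c => c == -1)).length) : Nat) : Int) =
      max (((cB.values.filter (fun c => c == 1)).length : Nat) : Int)
        ((cB.size : Int) - (((cB.values.filter (fun c => c == 1)).length : Nat) : Int)) := by
  have hperm : cA.keys.Perm cB.keys := by
    rw [List.perm_ext_iff_of_nodup hndA hndB]
    intro a
    rw [← PySem.Dict.contains_iff_mem_keys, ← PySem.Dict.contains_iff_mem_keys,
      PySem.Dict.contains_eq_isSome_get?, PySem.Dict.contains_eq_isSome_get?, hBA a]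
  have hgd : ∀ k, cB.getD k 0 = cA.getD k 0 := by
    intro k
    rw [PySem.Dict.getD_eq_get?_getD, PySem.Dict.getD_eq_get?_getD, hBA k]
  have hvA := PySem.Dict.values_eq_map_keys cA hndA 0
  have hvB := PySem.Dict.values_eq_map_keys cB hndB 0
  have hredA : (cA.values.filter (fun c => c == 1)).length
      = cA.keys.countP (fun k => cA.getD k 0 == 1) := by
    rw [hvA, ← List.countP_eq_length_filter, List.countP_map]
    rfl
  have hblueA : (cA.values.filter (fun c => c == -1)).length
      = cA.keys.countP (fun k => cA.getD k 0 == -1) := by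
    rw [hvA, ← List.countP_eq_length_filter, List.countP_map]
    rfl
  have hredB : (cB.values.filter (fun c => c == 1)).length
      = cA.keys.countP (fun k => cA.getD k 0 == 1) := by
    rw [hvB, ← List.countP_eq_length_filter, List.countP_map,
      ← hperm.countP_eq]
    apply List.countP_congr
    intro k _
    simp [Function.comp, hgd k]
  have hsplit : cA.keys.length = cA.keys.countP (fun k => cA.getD k 0 == 1)
      + cA.keys.countP (fun k => cA.getD k 0 == -1) := by
    rw [List.length_eq_countP_add_countP (fun k => cA.getD k 0 == 1)]
    congr 1
    apply List.countP_congr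
    intro k hk
    have hcont : cA.contains k = true := (PySem.Dict.contains_iff_mem_keys _ _).mpr hk
    obtain ⟨c, hc⟩ := pvContains_get? hcont
    have hgdk : cA.getD k 0 = c := by rw [PySem.Dict.getD_eq_get?_getD, hc]; rfl
    rcases hpm k c hc with rfl | rfl <;> simp [hgdk]
  have hsize : cB.size = cA.keys.length := by
    rw [← pvKeysLen cB, hperm.length_eq]
  rw [hredA, hblueA, hredB, hsize]
  omega

-- ===== VERDICT (by name: the statement is the Claim_ definition above) =====
theorem maxGuestsColoring_spec : Claim_equal_maxGuestsColoring := by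
  unfold Claim_equal_maxGuestsColoring
  intro dislikes _
  unfold Spec_maxGuestsColoring
  obtain ⟨hsym, hnd⟩ := pvBuild_facts dislikes
  obtain ⟨okA, cA, okB, cB, hA, hB, hok, hres⟩ :=
    pvOuter_eq (pvBuildGraphA dislikes) hsym hnd (pvBuildGraphA dislikes).keys
      PySem.Dict.empty PySem.Dict.empty
      (fun k hk => hk) PySem.Dict.nodup_keys_empty PySem.Dict.nodup_keys_empty
      (fun x hx _ _ => by rw [PySem.Dict.contains_empty] at hx; cases hx)
      (fun v c hvc => by rw [PySem.Dict.get?_empty] at hvc; cases hvc)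
      (fun v => rfl)
  simp only [maxGuestsColoring, maxGuestsColoring_alt]
  rw [show (dislikes.foldl (fun g p =>
    (g.modify p.1 PySem.Set.empty (fun s => PySem.Set.add s p.2)).modify p.2
      PySem.Set.empty (fun s => PySem.Set.add s p.1)) PySem.Dict.empty)
    = pvBuildGraphA dislikes from rfl]
  rw [hA, hB, ← hok]
  cases okA with
  | false => rfl
  | true =>
    obtain ⟨hndA, hndB, hBA, hpm⟩ := hres rfl
    exact pvCount_eq cA cB hndA hndB hBA hpm
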